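-- pv_equiv track=rewrite | github.com/MaddoxLeigh/NEO4j_PremierLeague_Analysis_Project | utilities/fbref.py | add_team_name_to_player
-- ===== SOURCE A (Python) =====
-- def add_team_name_to_player(player_details, team_details):
--     """
--     As the team of a player might be different to that on their player page, we need to add the team that they played in that season into  their player details dictionary.
--
--     We do this by itearting over the team_details which contains a list of players for each team and we write the team name, the team they played for in a given season, to the player dictionary.
--
--     We also add their name to within this dictionary (in a way flatten the player details dictionary to a player_name:player_details format to just a dictionary) and returning these dictionaries as a list.
--     """
--
--     for team_name, players_names_list in team_details.items():
--         for player in players_names_list: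
--             if player in player_details.keys():
--                 player_details[player]['Team'] = team_name
--     for player in player_details.keys():
--         player_details[player]['Name'] = player
--     player_details = list(player_details.values())
--     return player_details
-- ===== SOURCE B (Python) =====
-- def add_team_name_to_player(player_details, team_details):
--     """Per-player reverse search: instead of scanning team_details and writing
--     team names into the target dict (plus a second Name loop), look up each
--     player's team by searching team_details in reverse order (first hit in
--     reverse = last-team-wins) while attaching Name in the same single pass.
--     Mutates the inner player dicts in place, like the original."""
--     teams_newest_first = list(reversed(list(team_details.items())))
--
--     def team_of(player):
--         for team_name, members in teams_newest_first:
--             if player in members: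
--                 return team_name
--         return None
--
--     result = []
--     for player, details in player_details.items():
--         team = team_of(player)
--         if team is not None:
--             details['Team'] = team
--         details['Name'] = player
--         result.append(details)
--     return result
-- ===== Notes on version B (the rewrite author's own statement) =====
-- stated objective: alternative
-- what changed: A scans team_details team-major, writing Team into the target dict, then runs a second Name loop; B never writes during a team scan at all: it searches team_details in reverse order per player (first hit in reverse reproduces last-team-wins) and attaches Team and Name in one pass, trading the pre-built write phase for a per-player search.
import Mathlib
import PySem

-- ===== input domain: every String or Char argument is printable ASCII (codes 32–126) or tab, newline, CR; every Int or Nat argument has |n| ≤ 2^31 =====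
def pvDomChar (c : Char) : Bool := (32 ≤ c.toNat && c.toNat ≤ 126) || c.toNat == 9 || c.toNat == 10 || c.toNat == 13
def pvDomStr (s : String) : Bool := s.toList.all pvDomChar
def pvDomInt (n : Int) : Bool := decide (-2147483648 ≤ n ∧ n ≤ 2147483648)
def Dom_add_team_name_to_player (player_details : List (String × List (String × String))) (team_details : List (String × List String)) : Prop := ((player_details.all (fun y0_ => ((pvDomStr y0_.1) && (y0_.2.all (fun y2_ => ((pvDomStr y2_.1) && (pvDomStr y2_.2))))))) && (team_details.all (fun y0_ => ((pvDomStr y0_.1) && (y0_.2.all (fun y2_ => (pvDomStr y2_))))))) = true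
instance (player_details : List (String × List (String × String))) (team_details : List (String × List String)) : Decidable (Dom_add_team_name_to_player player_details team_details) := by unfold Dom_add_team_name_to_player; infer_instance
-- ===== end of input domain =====

-- B replaces A's team-major write phase plus separate Name loop by a per-player reverse
-- search of team_details (first hit in reverse = last-team-wins) in one pass (alternative).
-- Like A, the Python B mutates the inner player dicts in place; the theorems are about the return value.

-- ===== PORT A =====
def add_team_name_to_player (player_details : List (String × List (String × String))) (team_details : List (String × List String)) : List (List (String × String)) :=
  -- player_details as a dict of dicts
  let d0 : PySem.Dict String (PySem.Dict String String) :=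
    PySem.Dict.mk (player_details.map (fun kv => (kv.1, PySem.Dict.mk kv.2)))
  -- for team_name, players_names_list in team_details.items(): for player in …:
  --   if player in player_details.keys(): player_details[player]['Team'] = team_name
  let d1 := team_details.foldl (fun acc t =>
      t.2.foldl (fun acc p =>
        if acc.contains p then
          acc.modify p (PySem.Dict.mk []) (fun v => v.insert "Team" t.1)
        else acc) acc) d0
  -- for player in player_details.keys(): player_details[player]['Name'] = player
  let d2 := d1.keys.foldl (fun acc p =>
      acc.modify p (PySem.Dict.mk []) (fun v => v.insert "Name" p)) d1
  -- list(player_details.values())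
  d2.values.map PySem.Dict.items

-- ===== PORT B =====
def add_team_name_to_player_alt (player_details : List (String × List (String × String))) (team_details : List (String × List String)) : List (List (String × String)) :=
  -- teams_newest_first = list(reversed(list(team_details.items())))
  let teams_newest_first := team_details.reverse
  -- for player, details in …: team = team_of(player); …; result.append(details)
  player_details.map (fun kv =>
    let v := PySem.Dict.mk kv.2
    -- team_of: first team in teams_newest_first whose member list contains the player, else None
    let v := match teams_newest_first.findSome? (fun t => if t.2.contains kv.1 then some t.1 else none) with
             | some tn => v.insert "Team" tn
             | none => v
    (v.insert "Name" kv.1).items)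

-- ===== PRECONDITION & SPEC =====
-- Pre_ excludes association lists whose top-level keys repeat: the Python arguments are
-- dicts, which cannot carry duplicate keys, so such lists do not correspond to any input A runs on.
def Pre_add_team_name_to_player (player_details : List (String × List (String × String))) (team_details : List (String × List String)) : Prop :=
  (player_details.map Prod.fst).Nodup ∧ (team_details.map Prod.fst).Nodup
instance (player_details : List (String × List (String × String))) (team_details : List (String × List String)) : Decidable (Pre_add_team_name_to_player player_details team_details) := by unfold Pre_add_team_name_to_player; infer_instance

def pvWitness_add_team_name_to_player : (List (String × List (String × String))) × (List (String × List String)) :=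
  ([("p", [("Goals", "3")]), ("q", [])], [("T", ["p", "z"]), ("U", ["q"])])

def Spec_add_team_name_to_player (player_details : List (String × List (String × String))) (team_details : List (String × List String)) (out : List (List (String × String))) : Prop := out = add_team_name_to_player_alt player_details team_details
instance (player_details : List (String × List (String × String))) (team_details : List (String × List String)) (out : List (List (String × String))) : Decidable (Spec_add_team_name_to_player player_details team_details out) := by unfold Spec_add_team_name_to_player; infer_instance

-- ===== CLAIM (what is proved, stated in full; the proofs are below) =====
def Claim_equal_add_team_name_to_player : Prop := ∀ (player_details : List (String × List (String × String))) (team_details : List (String × List String)), Dom_add_team_name_to_player player_details team_details → Pre_add_team_name_to_player player_details team_details → Spec_add_team_name_to_player player_details team_details (add_team_name_to_player player_details team_details)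

-- ===== LEMMAS AND PROOFS =====

-- the (player, team) writes A performs, in order
def pvWrites (td : List (String × List String)) : List (String × String) :=
  td.flatMap (fun t => t.2.map (fun p => (p, t.1)))

-- the net effect of the team phase on one entry
def pvApplyT (m : PySem.Dict String String) (k : String) (v : PySem.Dict String String) : PySem.Dict String String :=
  match m.get? k with
  | some t => v.insert "Team" t
  | none => v

lemma pv_foldl_flatten {α : Type} (td : List (String × List String))
    (g : α → String → String → α) (a : α) :
    td.foldl (fun a t => t.2.foldl (fun a p => g a p t.1) a) a
      = (pvWrites td).foldl (fun a w => g a w.1 w.2) a := by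
  induction td generalizing a with
  | nil => rfl
  | cons t ts ih =>
      simp only [pvWrites, List.flatMap_cons, List.foldl_append, List.foldl_map, List.foldl_cons]
      rw [ih]; rfl

lemma pv_map_replace_eq {ν : Type} (l : List (String × ν)) (k : String) (val : String × ν)
    (h : k ∉ l.map Prod.fst) :
    l.map (fun q => if q.1 == k then val else q) = l := by
  induction l with
  | nil => rfl
  | cons q l ih =>
      simp only [List.map_cons, List.mem_cons, not_or] at h ⊢
      rw [if_neg (by simp only [beq_iff_eq]; exact fun hh => h.1 hh.symm), ih h.2]

lemma pv_modify_cons (p k : String) (w : PySem.Dict String String)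
    (rest : List (String × PySem.Dict String String)) (dflt : PySem.Dict String String)
    (f : PySem.Dict String String → PySem.Dict String String) (hk : p ≠ k) :
    (PySem.Dict.mk ((k, w) :: rest)).modify p dflt f
      = PySem.Dict.mk ((k, w) :: ((PySem.Dict.mk rest).modify p dflt f).items) := by
  have hkp : ((k : String) == p) = false := beq_eq_false_iff_ne.mpr (Ne.symm hk)
  have hget : (PySem.Dict.mk ((k, w) :: rest)).getD p dflt = (PySem.Dict.mk rest).getD p dflt := by
    simp [PySem.Dict.getD, PySem.Dict.get?_mk_cons, hkp]
  have hcont : (PySem.Dict.mk ((k, w) :: rest)).contains p = (PySem.Dict.mk rest).contains p := by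
    simp [PySem.Dict.contains, hkp]
  simp only [PySem.Dict.modify, hget]
  by_cases hc : (PySem.Dict.mk rest).contains p = true
  · apply PySem.Dict.ext
    rw [PySem.Dict.items_insert_of_contains _ _ (hcont.trans hc),
        PySem.Dict.items_insert_of_contains _ _ hc]
    simp only [List.map_cons, hkp, Bool.false_eq_true, if_false]
  · apply PySem.Dict.ext
    rw [PySem.Dict.items_insert_of_not_contains _ _ (by rw [hcont]; exact Bool.eq_false_iff.mpr hc),
        PySem.Dict.items_insert_of_not_contains _ _ (Bool.eq_false_iff.mpr hc)]
    rfl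

lemma pv_applyT_insert_self (m : PySem.Dict String String) (p t : String)
    (v : PySem.Dict String String) :
    (pvApplyT m p v).insert "Team" t = pvApplyT (m.insert p t) p v := by
  cases hm : m.get? p <;>
    simp [pvApplyT, hm, PySem.Dict.get?_insert_self, PySem.Dict.insert_insert_self]

lemma pv_applyT_insert_of_ne (m : PySem.Dict String String) {k p : String} (t : String)
    (v : PySem.Dict String String) (hne : k ≠ p) :
    pvApplyT (m.insert p t) k v = pvApplyT m k v := by
  simp [pvApplyT, PySem.Dict.get?_insert_of_ne m t hne]

lemma pv_stepA (m : PySem.Dict String String) (p t : String) :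
    ∀ (pd0 : List (String × PySem.Dict String String)), (pd0.map Prod.fst).Nodup →
    (let d := PySem.Dict.mk (pd0.map (fun kv => (kv.1, pvApplyT m kv.1 kv.2)));
     if d.contains p then d.modify p (PySem.Dict.mk []) (fun v => v.insert "Team" t) else d)
      = PySem.Dict.mk (pd0.map (fun kv => (kv.1, pvApplyT (m.insert p t) kv.1 kv.2))) := by
  intro pd0
  induction pd0 with
  | nil => intro _; simp [PySem.Dict.contains]
  | cons kv rest ih =>
      intro h
      simp only [List.map_cons, List.nodup_cons] at h
      obtain ⟨hkv, hrest⟩ := h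
      dsimp only at ih ⊢
      simp only [List.map_cons]
      by_cases hp : p = kv.1
      · subst hp
        have hcont : (PySem.Dict.mk ((kv.1, pvApplyT m kv.1 kv.2) ::
            rest.map (fun kv => (kv.1, pvApplyT m kv.1 kv.2)))).contains kv.1 = true := by
          simp [PySem.Dict.contains]
        rw [if_pos hcont]
        apply PySem.Dict.ext
        rw [PySem.Dict.modify, PySem.Dict.items_insert_of_contains _ _ hcont]
        have hgd : (PySem.Dict.mk ((kv.1, pvApplyT m kv.1 kv.2) ::
            rest.map (fun kv => (kv.1, pvApplyT m kv.1 kv.2)))).getD kv.1 (PySem.Dict.mk [])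
              = pvApplyT m kv.1 kv.2 := by
          simp [PySem.Dict.getD, PySem.Dict.get?_mk_cons]
        rw [hgd]
        simp only [List.map_cons, beq_self_eq_true, if_pos]
        rw [pv_map_replace_eq _ kv.1 _ (by simpa using hkv)]
        congr 1
        · rw [pv_applyT_insert_self]
        · refine List.map_congr_left fun kv' h' => ?_
          have hne : kv'.1 ≠ kv.1 := fun e => hkv (e ▸ List.mem_map_of_mem h')
          rw [pv_applyT_insert_of_ne _ _ _ hne]
      · have hb : ((kv.1 : String) == p) = false := beq_eq_false_iff_ne.mpr (Ne.symm hp)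
        have hcont : (PySem.Dict.mk ((kv.1, pvApplyT m kv.1 kv.2) ::
            rest.map (fun kv => (kv.1, pvApplyT m kv.1 kv.2)))).contains p
              = (PySem.Dict.mk (rest.map (fun kv => (kv.1, pvApplyT m kv.1 kv.2)))).contains p := by
          simp [PySem.Dict.contains, hb]
        have hhd : pvApplyT (m.insert p t) kv.1 kv.2 = pvApplyT m kv.1 kv.2 :=
          pv_applyT_insert_of_ne _ _ _ (fun e => hp e.symm)
        simp only [hcont, hhd]
        by_cases hc : (PySem.Dict.mk (rest.map (fun kv => (kv.1, pvApplyT m kv.1 kv.2)))).contains p = true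
        · rw [if_pos hc, pv_modify_cons p kv.1 _ _ _ _ hp]
          have hrec := ih hrest
          rw [if_pos hc] at hrec
          rw [hrec]
        · rw [if_neg hc]
          have hrec := ih hrest
          rw [if_neg hc] at hrec
          have h12 : List.map (fun kv => (kv.1, pvApplyT m kv.1 kv.2)) rest
              = List.map (fun kv => (kv.1, pvApplyT (m.insert p t) kv.1 kv.2)) rest :=
            congrArg PySem.Dict.items hrec
          rw [h12]

lemma pv_flattenA (td : List (String × List String))
    (a : PySem.Dict String (PySem.Dict String String)) :
    td.foldl (fun acc t => t.2.foldl (fun acc p =>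
        if acc.contains p then acc.modify p (PySem.Dict.mk []) (fun v => v.insert "Team" t.1)
        else acc) acc) a
      = (pvWrites td).foldl (fun acc w =>
          if acc.contains w.1 then acc.modify w.1 (PySem.Dict.mk []) (fun v => v.insert "Team" w.2)
          else acc) a :=
  pv_foldl_flatten td (fun acc p tn =>
    if acc.contains p then acc.modify p (PySem.Dict.mk []) (fun v => v.insert "Team" tn)
    else acc) a

lemma pv_phase1 (ws : List (String × String))
    (pd0 : List (String × PySem.Dict String String)) (m : PySem.Dict String String)
    (h : (pd0.map Prod.fst).Nodup) :
    ws.foldl (fun acc w =>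
        if acc.contains w.1 then acc.modify w.1 (PySem.Dict.mk []) (fun v => v.insert "Team" w.2)
        else acc)
      (PySem.Dict.mk (pd0.map (fun kv => (kv.1, pvApplyT m kv.1 kv.2))))
      = PySem.Dict.mk (pd0.map (fun kv =>
          (kv.1, pvApplyT (ws.foldl (fun m w => m.insert w.1 w.2) m) kv.1 kv.2))) := by
  induction ws generalizing m with
  | nil => rfl
  | cons w ws ih =>
      simp only [List.foldl_cons]
      rw [show (if (PySem.Dict.mk (pd0.map (fun kv => (kv.1, pvApplyT m kv.1 kv.2)))).contains w.1 then _ else _) =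
        PySem.Dict.mk (pd0.map (fun kv => (kv.1, pvApplyT (m.insert w.1 w.2) kv.1 kv.2))) from pv_stepA m w.1 w.2 pd0 h]
      exact ih _

lemma pv_foldl_modify_cons (g : String → PySem.Dict String String → PySem.Dict String String)
    (ps : List String) (k : String) (w : PySem.Dict String String)
    (rest : List (String × PySem.Dict String String)) (hk : k ∉ ps) :
    ps.foldl (fun acc p => acc.modify p (PySem.Dict.mk []) (g p)) (PySem.Dict.mk ((k, w) :: rest))
      = PySem.Dict.mk ((k, w) :: (ps.foldl (fun acc p => acc.modify p (PySem.Dict.mk []) (g p)) (PySem.Dict.mk rest)).items) := by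
  induction ps generalizing rest with
  | nil => rfl
  | cons p ps ih =>
      simp only [List.mem_cons, not_or] at hk
      simp only [List.foldl_cons]
      rw [pv_modify_cons p k w rest _ _ (fun hpk => hk.1 hpk.symm), ih _ hk.2]

lemma pv_phase2 (l : List (String × PySem.Dict String String))
    (h : (l.map Prod.fst).Nodup) :
    (l.map Prod.fst).foldl (fun acc p => acc.modify p (PySem.Dict.mk []) (fun v => v.insert "Name" p)) (PySem.Dict.mk l)
      = PySem.Dict.mk (l.map (fun kv => (kv.1, kv.2.insert "Name" kv.1))) := by
  induction l with
  | nil => rfl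
  | cons kv rest ih =>
      obtain ⟨k, v⟩ := kv
      simp only [List.map_cons, List.nodup_cons] at h
      obtain ⟨hk, hrest⟩ := h
      simp only [List.map_cons, List.foldl_cons]
      have hcont : (PySem.Dict.mk ((k, v) :: rest)).contains k = true := by
        simp [PySem.Dict.contains]
      have hstep : (PySem.Dict.mk ((k, v) :: rest)).modify k (PySem.Dict.mk [])
          (fun w => w.insert "Name" k) = PySem.Dict.mk ((k, v.insert "Name" k) :: rest) := by
        apply PySem.Dict.ext
        rw [PySem.Dict.modify, PySem.Dict.items_insert_of_contains _ _ hcont]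
        have hgd : (PySem.Dict.mk ((k, v) :: rest)).getD k (PySem.Dict.mk []) = v := by
          simp [PySem.Dict.getD, PySem.Dict.get?_mk_cons]
        rw [hgd]
        simp only [List.map_cons, beq_self_eq_true, if_pos]
        rw [pv_map_replace_eq _ k _ hk]
      rw [hstep, pv_foldl_modify_cons (fun p w => w.insert "Name" p) _ _ _ _ hk, ih hrest]

lemma pv_phase2' (l : List (String × PySem.Dict String String))
    (h : (l.map Prod.fst).Nodup) :
    (PySem.Dict.mk l).keys.foldl (fun acc p => acc.modify p (PySem.Dict.mk []) (fun v => v.insert "Name" p)) (PySem.Dict.mk l)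
      = PySem.Dict.mk (l.map (fun kv => (kv.1, kv.2.insert "Name" kv.1))) :=
  pv_phase2 l h

-- inner team scan: all inserts carry the same team name
lemma pv_lookup_members (ms : List String) (tn q : String) :
    ∀ m : PySem.Dict String String,
    (ms.foldl (fun m p => m.insert p tn) m).get? q
      = if ms.contains q then some tn else m.get? q := by
  induction ms with
  | nil => intro m; simp
  | cons p ps ih =>
      intro m
      simp only [List.foldl_cons, ih (m.insert p tn)]
      by_cases hq : q = p
      · subst hq
        by_cases hc : ps.contains q = true <;>
          simp [PySem.Dict.get?_insert_self]
      · have : (m.insert p tn).get? q = m.get? q := PySem.Dict.get?_insert_of_ne m tn hq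
        by_cases hc : ps.contains q = true <;>
          simp [hq, this]

-- A's accumulated team dict answers exactly the per-player reverse search of B
lemma pv_lookup (td : List (String × List String)) (q : String) :
    ∀ m : PySem.Dict String String,
    (td.foldl (fun m t => t.2.foldl (fun m p => m.insert p t.1) m) m).get? q
      = (td.reverse.findSome? (fun t => if t.2.contains q then some t.1 else none)).or (m.get? q) := by
  induction td with
  | nil => intro m; simp
  | cons t ts ih =>
      intro m
      simp only [List.foldl_cons, List.reverse_cons, List.findSome?_append, ih]
      rw [pv_lookup_members t.2 t.1 q m]
      cases hf : ts.reverse.findSome? (fun t => if t.2.contains q then some t.1 else none) with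
      | some tn => simp
      | none =>
          by_cases hc : q ∈ t.2 <;> simp [hc]

-- ===== VERDICT (by name: the statement is the Claim_ definition above) =====
theorem add_team_name_to_player_spec : Claim_equal_add_team_name_to_player := by
  intro pd td _ hpre
  obtain ⟨hpd, htd⟩ := hpre
  unfold Spec_add_team_name_to_player add_team_name_to_player add_team_name_to_player_alt
  dsimp only
  rw [pv_flattenA td]
  have hnd : ((pd.map (fun kv => (kv.1, PySem.Dict.mk kv.2))).map Prod.fst).Nodup := by
    simpa [List.map_map, Function.comp] using hpd
  have h0 : (pd.map (fun kv => (kv.1, PySem.Dict.mk kv.2))).map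
      (fun kv => (kv.1, pvApplyT (PySem.Dict.mk []) kv.1 kv.2))
        = pd.map (fun kv => (kv.1, PySem.Dict.mk kv.2)) := by
    simp [pvApplyT, PySem.Dict.get?]
  rw [show PySem.Dict.mk (pd.map (fun kv => (kv.1, PySem.Dict.mk kv.2)))
        = PySem.Dict.mk ((pd.map (fun kv => (kv.1, PySem.Dict.mk kv.2))).map
            (fun kv => (kv.1, pvApplyT (PySem.Dict.mk []) kv.1 kv.2))) from (congrArg _ h0).symm]
  rw [pv_phase1 (pvWrites td) _ (PySem.Dict.mk []) hnd]
  have hndL : ((List.map (fun kv => (kv.1,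
      pvApplyT (List.foldl (fun m w => m.insert w.1 w.2) (PySem.Dict.mk []) (pvWrites td)) kv.1 kv.2))
      (List.map (fun kv => (kv.1, PySem.Dict.mk kv.2)) pd)).map Prod.fst).Nodup := by
    simpa [List.map_map, Function.comp] using hpd
  rw [pv_phase2' _ hndL]
  simp only [PySem.Dict.values, List.map_map]
  refine List.map_congr_left fun kv _ => ?_
  simp only [Function.comp_apply]
  have hM : (List.foldl (fun m w => m.insert w.1 w.2) (PySem.Dict.mk []) (pvWrites td)).get? kv.1
      = td.reverse.findSome? (fun t => if t.2.contains kv.1 then some t.1 else none) := by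
    rw [← pv_foldl_flatten td (fun m p tn => m.insert p tn) (PySem.Dict.mk [])]
    rw [pv_lookup td kv.1 (PySem.Dict.mk [])]
    simp [PySem.Dict.get?]
  simp only [pvApplyT, hM]
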